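-- pv_equiv track=rewrite | github.com/Valkiz/Recommender-System | Calculations.py | getTopFive
-- ===== SOURCE A (Python) =====
-- def getTopFive(sim:list):
--     top5 = []  # Индексы похожих юзеров
--     simGrades = list(sim)
--     simGrades.sort(reverse=True)
--     taken = 0
--     for a in simGrades:
--         whichUser = sim.index(a)
--         while whichUser in top5:
--             whichUser = sim.index(a, whichUser + 1)
--         top5.append(whichUser)
--         taken += 1
--         if taken == 5: break
--     return top5
-- ===== SOURCE B (Python) =====
-- def getTopFive(sim: list):
--     best = []  # (value, index) pairs kept ordered: value desc, then index asc; at most 5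
--     for i, v in enumerate(sim):
--         if len(best) == 5 and v <= best[4][0]:
--             continue
--         j = 0
--         while j < len(best) and best[j][0] >= v:
--             j += 1
--         best.insert(j, (v, i))
--         del best[5:]
--     return [idx for _, idx in best]
-- ===== Notes on version B (the rewrite author's own statement) =====
-- stated objective: faster
-- what changed: Replaced the full descending sort plus repeated sim.index rescans with a single left-to-right pass that maintains an ordered buffer of at most 5 (value, index) pairs, returning their indices.
import Mathlib
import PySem

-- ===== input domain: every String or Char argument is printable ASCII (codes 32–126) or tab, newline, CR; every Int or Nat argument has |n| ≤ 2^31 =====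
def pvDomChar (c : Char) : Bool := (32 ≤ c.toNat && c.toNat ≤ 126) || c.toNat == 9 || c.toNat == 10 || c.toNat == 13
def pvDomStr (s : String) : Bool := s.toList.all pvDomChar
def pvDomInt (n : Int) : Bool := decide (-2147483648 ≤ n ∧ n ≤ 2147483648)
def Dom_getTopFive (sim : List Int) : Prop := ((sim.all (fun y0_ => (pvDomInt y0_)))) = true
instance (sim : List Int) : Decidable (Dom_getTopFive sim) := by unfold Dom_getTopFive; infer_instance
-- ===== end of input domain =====

-- B replaces A's full descending sort plus repeated sim.index rescans by one left-to-right
-- pass keeping an ordered buffer of at most 5 (value, index) pairs (objective: faster).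

-- ===== PORT A =====
-- sim.index(a, start) for a Nat start: first position ≥ start holding a (none = ValueError).
-- Exact for the Python here: start = whichUser+1 ≥ 0, and list.index scans positions start.. upward.
def pyIndexFrom (sim : List Int) (a : Int) (start : Nat) : Option Nat :=
  (PySem.List.index? (sim.drop start) a).map (· + start)

-- bound used by the while-loop's termination
theorem pyIndexFrom_bounds {sim : List Int} {a : Int} {start w : Nat}
    (h : pyIndexFrom sim a start = some w) : start ≤ w ∧ w < sim.length := by
  unfold pyIndexFrom at h
  rcases Option.map_eq_some_iff.mp h with ⟨k, hk, rfl⟩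
  rcases PySem.List.getElem_of_index?_eq_some hk with ⟨hlt, -, -⟩
  simp [List.length_drop] at hlt
  omega

-- the 'while whichUser in top5: whichUser = sim.index(a, whichUser + 1)' loop
def whileA (sim : List Int) (a : Int) (top5 : List Int) (w : Nat) : Option Nat :=
  if (w : Int) ∈ top5 then
    match h : pyIndexFrom sim a (w + 1) with
    | none => none            -- Python raises ValueError (never reached on any input, proved below)
    | some w' => whileA sim a top5 w'
  else some w
termination_by sim.length - w
decreasing_by
  have := pyIndexFrom_bounds h
  omega

-- the 'for a in simGrades' loop with the taken-counter and the break at 5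
def loopA (sim : List Int) : List Int → List Int → Nat → List Int
  | [], top5, _ => top5
  | a :: rest, top5, taken =>
    match PySem.List.index? sim a with
    | none => top5            -- Python raises ValueError (never reached: a comes from a copy of sim)
    | some w0 =>
      match whileA sim a top5 w0 with
      | none => top5          -- Python raises ValueError (never reached, proved below)
      | some w =>
        let top5' := top5 ++ [(w : Int)]
        if taken + 1 == 5 then top5' else loopA sim rest top5' (taken + 1)

def getTopFive (sim : List Int) : List Int :=
  loopA sim (PySem.List.sorted sim (fun x => x) true) [] 0

-- ===== PORT B =====
-- the inner while+insert of Source B: place p into best (value desc, index asc) scanning from the left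
def insertBest (p : Int × Int) : List (Int × Int) → List (Int × Int)
  | [] => [p]
  | q :: rest => if p.1 ≤ q.1 then q :: insertBest p rest else p :: q :: rest

-- the fast-reject test of Source B: buffer already full and v no better than its last value
def skipNew (best : List (Int × Int)) (v : Int) : Bool :=
  best.length == 5 && (match best[4]? with
    | some q => decide (v ≤ q.1)
    | none => false)

def getTopFive_alt (sim : List Int) : List Int :=
  (((PySem.List.enumerate sim 0).foldl
      (fun best iv => if skipNew best iv.2 then best
                      else (insertBest (iv.2, iv.1) best).take 5) []).map (·.2))

-- ===== PRECONDITION & SPEC =====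
def Spec_getTopFive (sim : List Int) (out : List Int) : Prop := out = getTopFive_alt sim
instance (sim : List Int) (out : List Int) : Decidable (Spec_getTopFive sim out) := by unfold Spec_getTopFive; infer_instance

-- ===== CLAIM (what is proved, stated in full; the proofs are below) =====
def Claim_equal_getTopFive : Prop := ∀ (sim : List Int), Dom_getTopFive sim → Spec_getTopFive sim (getTopFive sim)

-- ===== LEMMAS AND PROOFS =====

-- the untrimmed insertion sort of the swapped enumeration: B's buffer is its 5-prefix
def fullSort (sim : List Int) : List (Int × Int) :=
  (PySem.List.enumerate sim 0).foldl (fun acc iv => insertBest (iv.2, iv.1) acc) []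

-- strict order maintained by insertBest when indices arrive increasing
def RB (p q : Int × Int) : Prop := q.1 < p.1 ∨ (p.1 = q.1 ∧ p.2 < q.2)

theorem mem_insertBest {p x : Int × Int} {l : List (Int × Int)} :
    x ∈ insertBest p l ↔ x = p ∨ x ∈ l := by
  induction l with
  | nil => simp [insertBest]
  | cons q rest ih =>
    by_cases h : p.1 ≤ q.1 <;> simp [insertBest, h, ih] <;> tauto

theorem insertBest_perm (p : Int × Int) (l : List (Int × Int)) :
    (insertBest p l).Perm (p :: l) := by
  induction l with
  | nil => simp [insertBest]
  | cons q rest ih =>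
    by_cases h : p.1 ≤ q.1
    · simpa [insertBest, h] using ((ih.cons q).trans (List.Perm.swap p q rest))
    · simp [insertBest, h]

theorem insertBest_pairwise {p : Int × Int} {l : List (Int × Int)}
    (hl : l.Pairwise RB) (hidx : ∀ q ∈ l, q.2 < p.2) :
    (insertBest p l).Pairwise RB := by
  induction l with
  | nil => simp [insertBest, List.pairwise_singleton]
  | cons q rest ih =>
    rcases List.pairwise_cons.mp hl with ⟨hq, hrest⟩
    by_cases h : p.1 ≤ q.1
    · have hmem : ∀ x ∈ insertBest p rest, RB q x := by
        intro x hx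
        rcases mem_insertBest.mp hx with rfl | hx
        · rcases lt_or_eq_of_le h with h' | h'
          · exact Or.inl h'
          · exact Or.inr ⟨h'.symm, hidx q (by simp)⟩
        · exact hq x hx
      simpa [insertBest, h] using List.pairwise_cons.mpr
        ⟨hmem, ih hrest (fun x hx => hidx x (by simp [hx]))⟩
    · push_neg at h
      have hall : ∀ x ∈ q :: rest, RB p x := by
        intro x hx
        rcases List.mem_cons.mp hx with rfl | hx
        · exact Or.inl h
        · rcases hq x hx with h' | ⟨h', _⟩
          · exact Or.inl (h'.trans h)
          · exact Or.inl (h' ▸ h)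
      simpa [insertBest, h.not_ge] using List.pairwise_cons.mpr ⟨hall, hl⟩

-- fullSort invariants, by one induction over the list being enumerated
theorem fullSort_aux (xs : List Int) : ∀ (s : Int) (acc : List (Int × Int)),
    acc.Pairwise RB → (∀ q ∈ acc, q.2 < s) →
    (((PySem.List.enumerate xs s).foldl (fun acc iv => insertBest (iv.2, iv.1) acc) acc).Perm
        (((PySem.List.enumerate xs s).map (fun iv => (iv.2, iv.1))) ++ acc) ∧
     ((PySem.List.enumerate xs s).foldl (fun acc iv => insertBest (iv.2, iv.1) acc) acc).Pairwise RB) := by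
  induction xs with
  | nil =>
    intro s acc h1 h2
    simp only [PySem.List.enumerate_nil, List.foldl_nil, List.map_nil, List.nil_append]
    exact ⟨List.Perm.refl _, h1⟩
  | cons x xs ih =>
    intro s acc h1 h2
    have hpair : (insertBest (x, s) acc).Pairwise RB := insertBest_pairwise h1 (by simpa using h2)
    have hidx : ∀ q ∈ insertBest (x, s) acc, q.2 < s + 1 := by
      intro q hq
      rcases mem_insertBest.mp hq with rfl | hq
      · omega
      · have := h2 q hq; omega
    obtain ⟨hb, hc⟩ := ih (s + 1) (insertBest (x, s) acc) hpair hidx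
    refine ⟨?_, by simpa [PySem.List.enumerate_cons] using hc⟩
    rw [PySem.List.enumerate_cons]
    simp only [List.foldl_cons, List.map_cons]
    exact hb.trans ((List.Perm.append_left _ (insertBest_perm _ _)).trans List.perm_middle)

theorem fullSort_perm (sim : List Int) :
    (fullSort sim).Perm ((PySem.List.enumerate sim 0).map (fun iv => (iv.2, iv.1))) := by
  have := (fullSort_aux sim 0 [] (by simp) (by simp)).1
  simpa [fullSort] using this

theorem fullSort_pairwise (sim : List Int) : (fullSort sim).Pairwise RB :=
  (fullSort_aux sim 0 [] (by simp) (by simp)).2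

-- trimming commutes with insertion: B's trimmed buffer is take 5 of fullSort
theorem take_insertBest (p : Int × Int) (l : List (Int × Int)) (k : Nat) :
    (insertBest p (l.take k)).take k = (insertBest p l).take k := by
  induction l generalizing k with
  | nil => simp
  | cons q rest ih =>
    cases k with
    | zero => simp
    | succ k =>
      by_cases h : p.1 ≤ q.1
      · simp [insertBest, h, ih]
      · simp only [List.take_succ_cons, insertBest, if_neg h]
        cases k with
        | zero => simp
        | succ k => simp [List.take_take, Nat.min_def]

theorem insertBest_of_all_le {p : Int × Int} {l : List (Int × Int)}
    (h : ∀ q ∈ l, p.1 ≤ q.1) : insertBest p l = l ++ [p] := by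
  induction l with
  | nil => rfl
  | cons q rest ih =>
    rw [insertBest, if_pos (h q (by simp)), ih (fun r hr => h r (by simp [hr]))]
    rfl

-- when the buffer is full and v does not beat its 5th value, the trimmed insertion is a no-op
theorem take_insertBest_of_skip {acc : List (Int × Int)} {x s : Int}
    (h1 : acc.Pairwise RB) (hskip : skipNew (acc.take 5) x = true) :
    (insertBest (x, s) acc).take 5 = acc.take 5 := by
  have hand := Bool.and_eq_true_iff.mp hskip
  have hlen5 : (acc.take 5).length = 5 := by
    have := hand.1; simpa using this
  obtain ⟨q, hq4⟩ : ∃ q, (acc.take 5)[4]? = some q :=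
    ⟨(acc.take 5)[4]'(by omega), List.getElem?_eq_getElem (by omega)⟩
  have hxq : x ≤ q.1 := by
    have h2 := hand.2
    rw [hq4] at h2
    simpa using h2
  have hp5 : (acc.take 5).Pairwise RB := List.Pairwise.sublist (List.take_sublist 5 acc) h1
  have hall : ∀ r ∈ acc.take 5, x ≤ r.1 := by
    intro r hr
    obtain ⟨j, hj, rfl⟩ := List.mem_iff_getElem.mp hr
    have hq : q = (acc.take 5)[4]'(by omega) := by
      rw [List.getElem?_eq_getElem (by omega)] at hq4
      exact (Option.some_injective _ hq4).symm
    rcases Nat.lt_or_ge j 4 with hj4 | hj4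
    · have hRB := List.pairwise_iff_getElem.mp hp5 j 4 hj (by omega) hj4
      rw [← hq] at hRB
      rcases hRB with h' | ⟨h', _⟩ <;> omega
    · have hj4' : j = 4 := by omega
      subst hj4'
      rw [← hq]
      exact hxq
  rw [← take_insertBest, insertBest_of_all_le hall,
      List.take_append_of_le_length (by omega), List.take_of_length_le (by omega)]

-- B's trimmed, fast-rejecting fold computes the 5-prefix of the untrimmed insertion sort
theorem alt_aux (xs : List Int) : ∀ (s : Int) (acc : List (Int × Int)),
    acc.Pairwise RB → (∀ q ∈ acc, q.2 < s) →
    (PySem.List.enumerate xs s).foldl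
      (fun best iv => if skipNew best iv.2 then best
                      else (insertBest (iv.2, iv.1) best).take 5) (acc.take 5) =
    ((PySem.List.enumerate xs s).foldl (fun acc iv => insertBest (iv.2, iv.1) acc) acc).take 5 := by
  induction xs with
  | nil => intro s acc _ _; simp [PySem.List.enumerate_nil]
  | cons x xs ih =>
    intro s acc h1 h2
    have hpair : (insertBest (x, s) acc).Pairwise RB := insertBest_pairwise h1 (by simpa using h2)
    have hidx : ∀ q ∈ insertBest (x, s) acc, q.2 < s + 1 := by
      intro q hq
      rcases mem_insertBest.mp hq with rfl | hq
      · omega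
      · have := h2 q hq; omega
    rw [PySem.List.enumerate_cons]
    simp only [List.foldl_cons]
    by_cases hskip : skipNew (acc.take 5) x = true
    · rw [if_pos hskip, ← take_insertBest_of_skip h1 hskip]
      exact ih (s + 1) (insertBest (x, s) acc) hpair hidx
    · rw [if_neg hskip, take_insertBest]
      exact ih (s + 1) (insertBest (x, s) acc) hpair hidx

theorem alt_eq_take_fullSort (sim : List Int) :
    getTopFive_alt sim = ((fullSort sim).take 5).map (·.2) := by
  unfold getTopFive_alt fullSort
  congr 1
  simpa using alt_aux sim 0 [] (by simp) (by simp)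

-- membership description of fullSort
theorem mem_fullSort {sim : List Int} {p : Int × Int} :
    p ∈ fullSort sim ↔ ∃ (k : Nat) (h : k < sim.length), p = (sim[k], (k : Int)) := by
  rw [(fullSort_perm sim).mem_iff]
  simp only [List.mem_map, PySem.List.mem_enumerate_iff]
  constructor
  · rintro ⟨iv, ⟨k, hk, rfl⟩, rfl⟩; exact ⟨k, hk, by simp⟩
  · rintro ⟨k, hk, rfl⟩; exact ⟨((k : Int), sim[k]), ⟨k, hk, by simp⟩, rfl⟩

theorem snd_fullSort_nodup (sim : List Int) : ((fullSort sim).map (·.2)).Nodup := by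
  have h1 : ((fullSort sim).map (·.2)).Perm
      (((PySem.List.enumerate sim 0).map (fun iv => (iv.2, iv.1))).map (·.2)) :=
    (fullSort_perm sim).map _
  have h2 : ((PySem.List.enumerate sim 0).map (fun iv => (iv.2, iv.1))).map (·.2) =
      (PySem.List.enumerate sim 0).map (·.1) := by
    simp [Function.comp_def]
  rw [h2, PySem.List.map_fst_enumerate] at h1
  exact h1.nodup_iff.mpr (by simpa using PySem.List.nodup_pyRange_one 0 (sim.length))

-- simGrades = the values along fullSort
theorem grades_eq (sim : List Int) :
    PySem.List.sorted sim (fun x => x) true = (fullSort sim).map (·.1) := by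
  have hperm : ((fullSort sim).map (·.1)).Perm sim := by
    refine ((fullSort_perm sim).map _).trans ?_
    have h2 : ((PySem.List.enumerate sim 0).map (fun iv => (iv.2, iv.1))).map (·.1) =
        (PySem.List.enumerate sim 0).map (·.2) := by
      simp [Function.comp_def]
    rw [h2, PySem.List.map_snd_enumerate]
  have hsorted : ((fullSort sim).map (·.1)).Pairwise (fun a b => b ≤ a) := by
    refine List.Pairwise.map _ ?_ (fullSort_pairwise sim)
    intro p q hpq
    rcases hpq with h | ⟨h, _⟩ <;> omega
  have h1 : ((PySem.List.sorted sim (fun x => x) true).reverse).Pairwise (fun a b => (a : Int) ≤ b) := by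
    rw [List.pairwise_reverse]
    exact PySem.List.sorted_pairwise_rev sim (fun x => x)
  have h2 : (((fullSort sim).map (·.1)).reverse).Pairwise (fun a b => (a : Int) ≤ b) := by
    rw [List.pairwise_reverse]; exact hsorted
  have hp : ((PySem.List.sorted sim (fun x => x) true).reverse).Perm
      (((fullSort sim).map (·.1)).reverse) := by
    refine (List.reverse_perm _).trans (((PySem.List.sorted_perm sim (fun x => x) true).trans hperm.symm).trans (List.reverse_perm _).symm)
  have heq := PySem.List.eq_of_perm_of_pairwise_le_of_injective (fun x : Int => x)
      (fun a b h => h) hp h1 h2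
  have := congrArg List.reverse heq
  simpa using this

theorem RB_irrefl (p : Int × Int) : ¬ RB p p := by
  intro h; rcases h with h | ⟨_, h⟩ <;> omega

theorem RB_asymm {p q : Int × Int} (h1 : RB p q) (h2 : RB q p) : False := by
  rcases h1 with h1 | ⟨h1, h1'⟩ <;> rcases h2 with h2 | ⟨h2, h2'⟩ <;> omega

theorem pos_lt_of_RB {L : List (Int × Int)} (hL : L.Pairwise RB) {i j : Nat}
    (hi : i < L.length) (hj : j < L.length) (h : RB L[i] L[j]) : i < j := by
  rcases Nat.lt_trichotomy i j with h' | h' | h'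
  · exact h'
  · subst h'; exact absurd h (RB_irrefl _)
  · exact absurd h (fun h => RB_asymm h (List.pairwise_iff_getElem.mp hL j i hj hi h'))

-- pyIndexFrom: full characterisation of a successful search
theorem pyIndexFrom_spec {sim : List Int} {a : Int} {start w : Nat}
    (h : pyIndexFrom sim a start = some w) :
    start ≤ w ∧ sim[w]? = some a ∧ ∀ j, start ≤ j → j < w → sim[j]? ≠ some a := by
  unfold pyIndexFrom at h
  rcases Option.map_eq_some_iff.mp h with ⟨k, hk, rfl⟩
  rcases PySem.List.getElem_of_index?_eq_some hk with ⟨hlt, hval, hmin⟩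
  have hlen : start + k < sim.length := by
    simp [List.length_drop] at hlt; omega
  refine ⟨by omega, ?_, ?_⟩
  · rw [List.getElem?_eq_getElem (by omega)]
    rw [List.getElem_drop] at hval
    simp [Nat.add_comm, hval]
  · intro j hj1 hj2 hj3
    have hjlt : j < sim.length := by omega
    have hd := hmin (j - start) (by omega)
    rw [List.getElem_drop] at hd
    have hd' : sim[start + (j - start)]? ≠ some a := by
      rw [List.getElem?_eq_getElem (by omega)]
      exact fun hc => hd (Option.some_injective _ hc)
    have he : start + (j - start) = j := by omega
    rw [he] at hd'
    exact hd' hj3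

theorem pyIndexFrom_isSome {sim : List Int} {a : Int} {start w : Nat}
    (hw : start ≤ w) (hval : sim[w]? = some a) : (pyIndexFrom sim a start).isSome := by
  unfold pyIndexFrom
  rw [Option.isSome_map, PySem.List.index?_isSome_iff]
  have hlt : w < sim.length := by
    by_contra h
    rw [List.getElem?_eq_none (by omega)] at hval; simp at hval
  have hg : (sim.drop start)[w - start]? = some a := by
    rw [List.getElem?_drop]
    have he : start + (w - start) = w := by omega
    rw [he]; exact hval
  exact List.mem_of_getElem? hg

-- the while-loop returns the least not-yet-taken occurrence of a
theorem whileA_correct (sim : List Int) (a : Int) (top5 : List Int) (w : Nat)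
    (hval : sim[w]? = some a) (hnot : (w : Int) ∉ top5)
    (hmin : ∀ j : Nat, j < w → sim[j]? = some a → (j : Int) ∈ top5) :
    ∀ d c : Nat, w - c ≤ d → c ≤ w → sim[c]? = some a → whileA sim a top5 c = some w := by
  intro d
  induction d with
  | zero =>
    intro c hd hcw _
    have : c = w := by omega
    subst this
    rw [whileA, if_neg hnot]
  | succ d ih =>
    intro c hd hcw hcval
    by_cases hmem : (c : Int) ∈ top5
    · have hcne : c ≠ w := by rintro rfl; exact hnot hmem
      have hclt : c < w := by omega
      have hsome := pyIndexFrom_isSome (a := a) (start := c + 1) (w := w) (by omega) hval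
      obtain ⟨w', hw'⟩ := Option.isSome_iff_exists.mp hsome
      obtain ⟨hw1, hw2, hw3⟩ := pyIndexFrom_spec hw'
      have hw'le : w' ≤ w := by
        by_contra hlt
        exact hw3 w (by omega) (by omega) hval
      rw [whileA, if_pos hmem, hw']
      exact ih w' (by omega) hw'le hw2
    · rw [whileA, if_neg hmem]
      have : c = w := by
        by_contra hne
        exact hmem (hmin c (by omega) hcval)
      rw [this]

-- one step of A's for-loop picks exactly fullSort[m]
theorem loopA_pick (sim : List Int) (m : Nat) (hm : m < (fullSort sim).length) :
    ∃ w0 : Nat, PySem.List.index? sim ((fullSort sim)[m].1) = some w0 ∧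
      whileA sim ((fullSort sim)[m].1) (((fullSort sim).take m).map (·.2)) w0 =
        some ((fullSort sim)[m].2.toNat) ∧
      (((fullSort sim)[m].2.toNat : Nat) : Int) = (fullSort sim)[m].2 := by
  set L := fullSort sim with hL
  obtain ⟨k, hk, hpk⟩ := mem_fullSort.mp (L.getElem_mem hm)
  have ha : L[m].1 = sim[k] := by rw [hpk]
  have hi : L[m].2 = (k : Int) := by rw [hpk]
  have hvalk : sim[k]? = some (L[m].1) := by rw [ha, List.getElem?_eq_getElem hk]
  -- index? succeeds: the value occurs in sim
  have hmem : L[m].1 ∈ sim := by rw [ha]; exact sim.getElem_mem hk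
  have hs : (PySem.List.index? sim (L[m].1)).isSome := by
    rw [PySem.List.index?_isSome_iff]; exact hmem
  obtain ⟨w0, hw0⟩ := Option.isSome_iff_exists.mp hs
  refine ⟨w0, hw0, ?_, by rw [hi]; simp⟩
  obtain ⟨hw0lt, hw0val, hw0min⟩ := PySem.List.getElem_of_index?_eq_some hw0
  have hw0k : w0 ≤ k := by
    by_contra hlt
    exact hw0min k (by omega) (by rw [← ha])
  -- the target k is not yet taken
  have hnot : ((k : Int)) ∉ (L.take m).map (·.2) := by
    intro hin
    obtain ⟨p, hpmem, hp2⟩ := List.mem_map.mp hin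
    obtain ⟨j, hj, hpj⟩ := List.mem_iff_getElem.mp hpmem
    have hjlen : j < m := by
      have := hj; simp [List.length_take] at this; omega
    have hjL : j < L.length := by omega
    have hgt : (L.take m)[j]'hj = L[j]'hjL := List.getElem_take
    have hsnd : (L.map (·.2))[j]'(by simpa using hjL) = (L.map (·.2))[m]'(by simpa using hm) := by
      simp only [List.getElem_map]
      rw [← hgt, hpj, hp2, hi]
    have := (List.Nodup.getElem_inj_iff (snd_fullSort_nodup sim)).mp hsnd
    omega
  -- every smaller occurrence is already taken
  have hmin : ∀ j : Nat, j < k → sim[j]? = some (L[m].1) → ((j : Int)) ∈ (L.take m).map (·.2) := by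
    intro j hjk hjval
    have hjlt : j < sim.length := by
      by_contra hc
      rw [List.getElem?_eq_none (by omega)] at hjval; simp at hjval
    have hpair : (L[m].1, (j : Int)) ∈ L := by
      rw [mem_fullSort]
      refine ⟨j, hjlt, ?_⟩
      rw [List.getElem?_eq_getElem hjlt] at hjval
      rw [Option.some_injective _ hjval]
    obtain ⟨p, hp, hpe⟩ := List.mem_iff_getElem.mp hpair
    have hRB : RB (L[p]'hp) (L[m]'hm) := by
      rw [hpe]
      refine Or.inr ⟨rfl, ?_⟩
      rw [hi]
      show ((j : Int)) < ((k : Int))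
      exact_mod_cast hjk
    have hpm : p < m := pos_lt_of_RB (fullSort_pairwise sim) hp hm hRB
    have hptake : L[p]'hp ∈ L.take m := by
      have hgt : (L.take m)[p]'(by simp [List.length_take]; omega) = L[p]'hp := List.getElem_take
      rw [← hgt]; exact List.getElem_mem _
    rw [List.mem_map]
    exact ⟨L[p]'hp, hptake, by rw [hpe]⟩
  -- run the while-loop with target k
  have hktoNat : L[m].2.toNat = k := by rw [hi]; simp
  rw [hktoNat]
  have hw0val' : sim[w0]? = some (L[m].1) := by
    rw [List.getElem?_eq_getElem hw0lt]
    exact congrArg some hw0val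
  exact whileA_correct sim (L[m].1) ((L.take m).map (·.2)) k hvalk hnot hmin (k - w0) w0
    (by omega) hw0k hw0val'

theorem loopA_eq (sim : List Int) :
    ∀ d m : Nat, 5 - m ≤ d → m < 5 →
    loopA sim (((fullSort sim).drop m).map (·.1)) (((fullSort sim).take m).map (·.2)) m =
    ((fullSort sim).take 5).map (·.2) := by
  intro d
  induction d with
  | zero => intro m hd hm; omega
  | succ d ih =>
    intro m _ hm
    by_cases hlen : m < (fullSort sim).length
    · rw [List.drop_eq_getElem_cons hlen, List.map_cons, loopA]
      obtain ⟨w0, hw0, hwhile, hcast⟩ := loopA_pick sim m hlen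
      simp only [hw0]
      simp only [hwhile]
      have ht : (((fullSort sim).take m).map (·.2)) ++ [(fullSort sim)[m].2] =
          ((fullSort sim).take (m + 1)).map (·.2) := by
        rw [List.map_take, List.map_take, List.take_add_one]
        have hlen' : m < ((fullSort sim).map (·.2)).length := by simpa using hlen
        rw [List.getElem?_eq_getElem hlen']
        simp
      rw [hcast, ht]
      by_cases h5 : m + 1 = 5
      · rw [if_pos (by simpa using h5), h5]
      · rw [if_neg (by simpa using h5)]
        exact ih (m + 1) (by omega) (by omega)
    · push_neg at hlen
      rw [List.drop_eq_nil_of_le hlen, List.map_nil]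
      show (((fullSort sim).take m).map (·.2)) = ((fullSort sim).take 5).map (·.2)
      rw [List.take_of_length_le hlen, List.take_of_length_le (by omega)]

-- ===== VERDICT (by name: the statement is the Claim_ definition above) =====
theorem getTopFive_spec : Claim_equal_getTopFive := by
  intro sim _
  unfold Spec_getTopFive getTopFive
  rw [grades_eq, alt_eq_take_fullSort]
  have h := loopA_eq sim 5 0 (by omega) (by omega)
  simpa using h
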